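-- pv_equiv track=rewrite | github.com/gokamoda/byte-tokenizer | src/tokenizer.py | unicode_to_bytes
-- ===== SOURCE A (Python) =====
-- def unicode_to_bytes(codepoint: int) -> list[int]:
--     codepoint_bin = f"{codepoint:b}"
--
--     if len(codepoint_bin) <= 7:  # 1byte char
--         codepoint_bin = f"{codepoint:07b}"
--         bytes_bin = [
--             "0" + codepoint_bin,
--         ]
--     elif len(codepoint_bin) <= 13:  # 2byte char
--         codepoint_bin = f"{codepoint:013b}"
--         bytes_bin = [
--             "10" + codepoint_bin[:6],
--             "0" + codepoint_bin[6:],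
--         ]
--     elif len(codepoint_bin) <= 18:  # 3byte char
--         codepoint_bin = f"{codepoint:018b}"
--         bytes_bin = [
--             "110" + codepoint_bin[:5],
--             "10" + codepoint_bin[5:11],
--             "0" + codepoint_bin[11:],
--         ]
--     elif len(codepoint_bin) <= 22:  # 4byte char
--         codepoint_bin = f"{codepoint:022b}"
--         bytes_bin = [
--             "1110" + codepoint_bin[:4],
--             "110" + codepoint_bin[4:9],
--             "10" + codepoint_bin[9:15],
--             "0" + codepoint_bin[15:],
--         ]
--     else:
--         raise ValueError("codepoint is too large")
--
--     return [int(byte, 2) for byte in bytes_bin]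
-- ===== SOURCE B (Python) =====
-- def unicode_to_bytes(codepoint: int) -> list[int]:
--     if not 0 <= codepoint < 1 << 22:
--         raise ValueError("codepoint is too large")
--     out = [codepoint % 0x80]
--     rest = codepoint // 0x80
--     prefix, width = 0x80, 0x40
--     while rest:
--         out.append(prefix + rest % width)
--         rest //= width
--         prefix = 0x80 + prefix // 2
--         width >>= 1
--     return out[::-1]
-- ===== Notes on version B (the rewrite author's own statement) =====
-- stated objective: simpler
-- what changed: Replaces the four string-formatting/slicing/int(_,2)-reparsing branches by one arithmetic loop that peels successively narrower bit chunks off the codepoint back-to-front with a shifting prefix, never touching strings.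
import Mathlib
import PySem

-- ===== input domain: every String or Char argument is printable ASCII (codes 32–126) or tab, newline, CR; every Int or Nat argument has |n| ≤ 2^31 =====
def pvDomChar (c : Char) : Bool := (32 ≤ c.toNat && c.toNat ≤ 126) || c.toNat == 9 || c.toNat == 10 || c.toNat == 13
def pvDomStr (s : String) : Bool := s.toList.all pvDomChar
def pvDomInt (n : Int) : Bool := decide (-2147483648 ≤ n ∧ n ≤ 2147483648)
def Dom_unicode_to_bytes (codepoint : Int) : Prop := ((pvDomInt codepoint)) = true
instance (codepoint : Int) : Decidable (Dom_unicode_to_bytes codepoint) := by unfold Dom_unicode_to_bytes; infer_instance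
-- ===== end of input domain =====

-- B replaces A's four string-format/slice/int(_,2) branches by one arithmetic loop peeling
-- successively narrower bit chunks off the codepoint back-to-front with a shifting prefix
-- (objective: simpler).

-- ===== PORT A =====

-- int(cs, 2): hand port, exact on every string A builds: they are nonempty and consist of
-- '0'/'1' (parsed like Python) unless the formatted codepoint was negative, in which case the
-- string contains '-' at a non-initial position and Python's int(_,2) raises ValueError = none.
-- (PySem.Int.ofCharsBase? additionally handles whitespace/sign/underscore/base-prefix forms that
-- can never occur in A's byte strings.)
def bin2step (a : Int) (c : Char) : Int := 2 * a + (if c = '1' then 1 else 0)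

def pyIntBin? (cs : List Char) : Option Int :=
  if cs ≠ [] ∧ cs.all (fun c => c = '0' || c = '1')
  then some (cs.foldl bin2step 0)
  else none

-- f"{n:0{w}b}": format(n,'b') zero-padded to total width w, the sign (if any) before the zeros.
def pyZeroPadBin (w : Nat) (n : Int) : List Char :=
  let b := PySem.Int.toBinChars n
  if n < 0 then '-' :: (List.replicate (w - b.length) '0' ++ b.drop 1)
  else List.replicate (w - b.length) '0' ++ b

def unicode_to_bytes (codepoint : Int) : List Int :=
  let codepoint_bin := PySem.Int.toBinChars codepoint
  let bytes_bin : List (List Char) :=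
    if codepoint_bin.length ≤ 7 then
      ['0' :: pyZeroPadBin 7 codepoint]
    else if codepoint_bin.length ≤ 13 then
      let p := pyZeroPadBin 13 codepoint
      ['1' :: '0' :: p.take 6, '0' :: p.drop 6]
    else if codepoint_bin.length ≤ 18 then
      let p := pyZeroPadBin 18 codepoint
      ['1' :: '1' :: '0' :: p.take 5, '1' :: '0' :: (p.drop 5).take 6, '0' :: p.drop 11]
    else if codepoint_bin.length ≤ 22 then
      let p := pyZeroPadBin 22 codepoint
      ['1' :: '1' :: '1' :: '0' :: p.take 4, '1' :: '1' :: '0' :: (p.drop 4).take 5,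
       '1' :: '0' :: (p.drop 9).take 6, '0' :: p.drop 15]
    else []   -- raise ValueError("codepoint is too large"): outside Pre_
  match bytes_bin.mapM pyIntBin? with
  | some xs => xs
  | none => []   -- int(byte, 2) raised ValueError ('-' inside the string): outside Pre_

-- ===== PORT B =====

-- the while loop; fuel is only a totality guard (the guard in unicode_to_bytes_alt bounds the iterations)
def bytesLoop : Nat → Int → Int → Int → List Int → List Int
  | 0, _, _, _, out => out
  | fuel + 1, rest, width, pfx, out =>
    if rest == 0 then out
    else bytesLoop fuel (PySem.Int.floordiv rest width) (PySem.Int.floordiv width 2)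
           (128 + PySem.Int.floordiv pfx 2) (out ++ [pfx + PySem.Int.mod rest width])

def unicode_to_bytes_alt (codepoint : Int) : List Int :=
  if ¬(0 ≤ codepoint ∧ codepoint < 4194304) then []   -- raise ValueError("codepoint is too large")
  else
    let out := [PySem.Int.mod codepoint 128]
    let rest := PySem.Int.floordiv codepoint 128
    (bytesLoop 23 rest 64 128 out).reverse   -- out[::-1]

-- ===== PRECONDITION & SPEC =====
-- Pre_: exactly where Python A returns; outside it A raises ValueError (a codepoint too large
-- for the four-byte form, or a negative one whose padded string makes int(_,2) raise).
def Pre_unicode_to_bytes (codepoint : Int) : Prop := 0 ≤ codepoint ∧ codepoint < 4194304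
instance (codepoint : Int) : Decidable (Pre_unicode_to_bytes codepoint) := by
  unfold Pre_unicode_to_bytes; infer_instance

def pvWitness_unicode_to_bytes : Int := 955

def Spec_unicode_to_bytes (codepoint : Int) (out : List Int) : Prop := out = unicode_to_bytes_alt codepoint
instance (codepoint : Int) (out : List Int) : Decidable (Spec_unicode_to_bytes codepoint out) := by
  unfold Spec_unicode_to_bytes; infer_instance

-- ===== CLAIM (what is proved, stated in full; the proofs are below) =====
def Claim_equal_unicode_to_bytes : Prop := ∀ (codepoint : Int), Dom_unicode_to_bytes codepoint → Pre_unicode_to_bytes codepoint → Spec_unicode_to_bytes codepoint (unicode_to_bytes codepoint)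

-- ===== LEMMAS AND PROOFS =====

-- MSB-first low w binary digits of n
def bits : Nat → Nat → List Char
  | 0, _ => []
  | w + 1, n => bits w (n / 2) ++ [Nat.digitChar (n % 2)]

theorem bits_length (w n : Nat) : (bits w n).length = w := by
  induction w generalizing n with
  | zero => rfl
  | succ w ih => simp [bits, ih]

theorem bits_all (w n : Nat) : (bits w n).all (fun c => c = '0' || c = '1') = true := by
  induction w generalizing n with
  | zero => rfl
  | succ w ih =>
    have h2 : n % 2 < 2 := Nat.mod_lt _ (by omega)
    interval_cases h : n % 2 <;> simp [bits, ih, h] <;> decide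

theorem bits_zero (w : Nat) : bits w 0 = List.replicate w '0' := by
  induction w with
  | zero => rfl
  | succ w ih => simp [bits, ih, List.replicate_succ']; rfl

theorem bits_split (a b n : Nat) : bits (a + b) n = bits a (n / 2 ^ b) ++ bits b n := by
  induction b generalizing n with
  | zero => simp [bits]
  | succ b ih =>
    have : a + (b + 1) = (a + b) + 1 := by omega
    rw [this]
    show bits (a + b) (n / 2) ++ [Nat.digitChar (n % 2)] = _
    rw [ih (n / 2), Nat.div_div_eq_div_mul, ← pow_succ']
    simp [bits]

theorem foldl_bits (w n : Nat) (a : Int) :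
    (bits w n).foldl bin2step a = a * 2 ^ w + ((n % 2 ^ w : Nat) : Int) := by
  induction w generalizing n a with
  | zero => simp [bits, Nat.mod_one]
  | succ w ih =>
    rw [bits, List.foldl_append, ih]
    have h2 : n % 2 < 2 := Nat.mod_lt _ (by omega)
    have hm : n % 2 ^ (w + 1) = n % 2 + 2 * (n / 2 % 2 ^ w) := by
      rw [pow_succ']; exact Nat.mod_mul
    interval_cases h : n % 2 <;> simp [bin2step, List.foldl_cons, hm, Nat.digitChar] <;> ring

-- the length of format(m,'b') for m : Nat (Python's bit length, but 1 for m = 0)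
def plen (m : Nat) : Nat := if m = 0 then 1 else PySem.Int.bitLength (m : Int)

theorem toDigitsCore_eq_bits (f : Nat) :
    ∀ (n : Nat) (acc : List Char), n < f →
      Nat.toDigitsCore 2 f n acc = bits (plen n) n ++ acc := by
  induction f with
  | zero => intro n acc h; omega
  | succ f ih =>
    intro n acc h
    rw [Nat.toDigitsCore]
    by_cases h2 : n / 2 = 0
    · have hp : plen n = 1 := by
        have hn : n < 2 := by omega
        interval_cases n <;> simp [plen]
        decide
      simp [h2, hp, bits]
    · have hn2 : 2 ≤ n := by omega
      rw [if_neg h2, ih (n / 2) _ (by omega)]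
      have hplen : plen n = plen (n / 2) + 1 := by
        have h0 : 0 < n := by omega
        have hbl := PySem.Int.bitLength_natCast h0
        rw [plen, plen, if_neg (show ¬n = 0 by omega), if_neg (show ¬n / 2 = 0 by omega), hbl]
      rw [hplen]
      simp [bits]

theorem toBinChars_cast (m : Nat) : PySem.Int.toBinChars (m : Int) = bits (plen m) m := by
  have : ¬((m : Int) < 0) := by omega
  simp only [PySem.Int.toBinChars, if_neg this, Int.toNat_natCast]
  have := toDigitsCore_eq_bits (m + 1) m [] (by omega)
  simpa [Nat.toDigits] using this

theorem lt_two_pow_plen (m : Nat) : m < 2 ^ plen m := by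
  by_cases h : m = 0
  · simp [plen, h]
  · have := PySem.Int.lt_two_pow_bitLength (m : Int)
    simpa [plen, h] using this

theorem plen_le_iff (m w : Nat) (hw : 1 ≤ w) : plen m ≤ w ↔ m < 2 ^ w := by
  constructor
  · intro h
    exact lt_of_lt_of_le (lt_two_pow_plen m) (Nat.pow_le_pow_right (by omega) h)
  · intro h
    by_cases hm : m = 0
    · simpa [plen, hm] using hw
    · by_contra hgt
      rw [plen, if_neg hm] at hgt
      have hle : w ≤ PySem.Int.bitLength (m : Int) - 1 := by omega
      have h2 := PySem.Int.two_pow_bitLength_le (m : Int) (by exact_mod_cast hm)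
      rw [Int.natAbs_natCast] at h2
      have : 2 ^ w ≤ 2 ^ (PySem.Int.bitLength (m : Int) - 1) :=
        Nat.pow_le_pow_right (by omega) hle
      omega

theorem pad_eq_bits (w m : Nat) (hw : 1 ≤ w) (h : m < 2 ^ w) :
    pyZeroPadBin w (m : Int) = bits w m := by
  have hneg : ¬((m : Int) < 0) := by omega
  have hple : plen m ≤ w := (plen_le_iff m w hw).mpr h
  simp only [pyZeroPadBin, if_neg hneg, toBinChars_cast, bits_length]
  rw [← bits_zero, show w = (w - plen m) + plen m by omega, bits_split,
    Nat.div_eq_of_lt (lt_two_pow_plen m)]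
  simp

-- parsing one byte string: the literal prefix chars fold first, then foldl_bits
theorem parse_byte (pre : List Char) (w n : Nat) (a : Int)
    (hpre : pre.foldl bin2step 0 = a ∧ pre.all (fun c => c = '0' || c = '1') = true) :
    pyIntBin? (pre ++ bits (w + 1) n) = some (a * 2 ^ (w + 1) + ((n % 2 ^ (w + 1) : Nat) : Int)) := by
  have hne : pre ++ bits (w + 1) n ≠ [] := by
    intro hc
    have := congrArg List.length hc
    simp [bits_length] at this
  rw [pyIntBin?, if_pos ⟨hne, by simp [List.all_append, hpre.2, bits_all]⟩]
  rw [List.foldl_append, hpre.1, foldl_bits]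

-- casts for the B-side arithmetic (Int literals vs Nat casts)
theorem fdiv_cast (m k : Nat) (kk : Int) (hk : (kk : Int) = (k : Int)) :
    PySem.Int.floordiv (m : Int) kk = ((m / k : Nat) : Int) := by
  rw [hk]; exact_mod_cast PySem.Int.floordiv_natCast m k

theorem mod_cast' (m k : Nat) (kk : Int) (hk : (kk : Int) = (k : Int)) :
    PySem.Int.mod (m : Int) kk = ((m % k : Nat) : Int) := by
  rw [hk]; exact_mod_cast PySem.Int.mod_natCast m k

-- one unfolding step of the loop
theorem bytesLoop_succ (f : Nat) (rest width pfx : Int) (out : List Int) :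
    bytesLoop (f + 1) rest width pfx out =
      if rest == 0 then out
      else bytesLoop f (PySem.Int.floordiv rest width) (PySem.Int.floordiv width 2)
             (128 + PySem.Int.floordiv pfx 2) (out ++ [pfx + PySem.Int.mod rest width]) := rfl

-- B evaluated on each of the four ranges
theorem altB (m : Nat) (h : m < 4194304) :
    unicode_to_bytes_alt (m : Int) =
      if m < 128 then [((m % 128 : Nat) : Int)]
      else if m < 8192 then
        [128 + ((m / 128 % 64 : Nat) : Int), ((m % 128 : Nat) : Int)]
      else if m < 262144 then
        [192 + ((m / 8192 % 32 : Nat) : Int), 128 + ((m / 128 % 64 : Nat) : Int),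
         ((m % 128 : Nat) : Int)]
      else
        [224 + ((m / 262144 % 16 : Nat) : Int), 192 + ((m / 8192 % 32 : Nat) : Int),
         128 + ((m / 128 % 64 : Nat) : Int), ((m % 128 : Nat) : Int)] := by
  have hpre : (0 : Int) ≤ (m : Int) ∧ (m : Int) < 4194304 := by
    constructor
    · exact Int.natCast_nonneg m
    · exact_mod_cast h
  rw [unicode_to_bytes_alt, if_neg (not_not_intro hpre)]
  simp only []
  rw [mod_cast' m 128 128 (by norm_num), fdiv_cast m 128 128 (by norm_num),
    show (23 : Nat) = 22 + 1 from rfl, bytesLoop_succ]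
  by_cases h1 : m < 128
  · rw [if_pos (by simp [Nat.div_eq_of_lt h1])]
    simp [h1]
  · rw [if_neg (by simp [beq_iff_eq]; omega),
      show PySem.Int.floordiv 64 2 = 32 from by decide,
      show (128 + PySem.Int.floordiv 128 2 : Int) = 192 from by decide,
      mod_cast' (m / 128) 64 64 (by norm_num), fdiv_cast (m / 128) 64 64 (by norm_num),
      show (22 : Nat) = 21 + 1 from rfl, bytesLoop_succ]
    by_cases h2 : m < 8192
    · rw [if_pos (by simp [beq_iff_eq]; omega)]
      simp [h1, h2]
    · rw [if_neg (by simp [beq_iff_eq]; omega),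
        show PySem.Int.floordiv 32 2 = 16 from by decide,
        show (128 + PySem.Int.floordiv 192 2 : Int) = 224 from by decide,
        mod_cast' (m / 128 / 64) 32 32 (by norm_num), fdiv_cast (m / 128 / 64) 32 32 (by norm_num),
        show (21 : Nat) = 20 + 1 from rfl, bytesLoop_succ]
      by_cases h3 : m < 262144
      · rw [if_pos (by simp [beq_iff_eq]; omega)]
        simp [h1, h2, h3, Nat.div_div_eq_div_mul]
      · rw [if_neg (by simp [beq_iff_eq]; omega),
          mod_cast' (m / 128 / 64 / 32) 16 16 (by norm_num),
          fdiv_cast (m / 128 / 64 / 32) 16 16 (by norm_num),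
          show (20 : Nat) = 19 + 1 from rfl, bytesLoop_succ]
        rw [if_pos (by simp [beq_iff_eq]; omega)]
        simp [h1, h2, h3, Nat.div_div_eq_div_mul]

-- ===== VERDICT (by name: the statement is the Claim_ definition above) =====
theorem unicode_to_bytes_spec : Claim_equal_unicode_to_bytes := by
  intro cp _ hpre
  unfold Spec_unicode_to_bytes
  obtain ⟨h0, h22⟩ := hpre
  lift cp to ℕ using h0 with m
  have hm : m < 4194304 := by exact_mod_cast h22
  rw [altB m hm, unicode_to_bytes]
  simp only [toBinChars_cast, bits_length]
  by_cases h1 : m < 128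
  · rw [if_pos ((plen_le_iff m 7 (by omega)).mpr (by omega)), if_pos h1]
    rw [pad_eq_bits 7 m (by omega) (by omega)]
    have hb := parse_byte ['0'] 6 m 0 (by constructor <;> decide)
    simp only [List.cons_append, List.nil_append] at hb
    simp [hb, List.mapM_cons]
  · rw [if_neg (by rw [plen_le_iff m 7 (by omega)]; omega), if_neg h1]
    by_cases h2 : m < 8192
    · rw [if_pos ((plen_le_iff m 13 (by omega)).mpr (by omega)), if_pos h2]
      rw [pad_eq_bits 13 m (by omega) (by omega),
        show (13 : Nat) = 6 + 7 from rfl, bits_split,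
        List.take_left' (bits_length 6 (m / 2 ^ 7)), List.drop_left' (bits_length 6 (m / 2 ^ 7))]
      have hb1 := parse_byte ['1', '0'] 5 (m / 2 ^ 7) 2 (by constructor <;> decide)
      have hb2 := parse_byte ['0'] 6 m 0 (by constructor <;> decide)
      simp only [List.cons_append, List.nil_append, show (5 : Nat) + 1 = 6 from rfl,
        show (6 : Nat) + 1 = 7 from rfl] at hb1 hb2
      norm_num at hb1 hb2
      simp [hb1, hb2, List.mapM_cons]
    · rw [if_neg (by rw [plen_le_iff m 13 (by omega)]; omega), if_neg h2]
      by_cases h3 : m < 262144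
      · rw [if_pos ((plen_le_iff m 18 (by omega)).mpr (by omega)), if_pos h3]
        rw [pad_eq_bits 18 m (by omega) (by omega),
          show (18 : Nat) = 5 + 13 from rfl, bits_split,
          show bits 13 m = bits 6 (m / 2 ^ 7) ++ bits 7 m from bits_split 6 7 m]
        have d11 : ((bits 5 (m / 2 ^ 13) ++ (bits 6 (m / 2 ^ 7) ++ bits 7 m))).drop 11
            = bits 7 m := by
          rw [← List.append_assoc]
          exact List.drop_left' (by simp [bits_length])
        rw [d11, List.take_left' (bits_length 5 (m / 2 ^ 13)),
          List.drop_left' (bits_length 5 (m / 2 ^ 13)),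
          List.take_left' (bits_length 6 (m / 2 ^ 7))]
        have hb1 := parse_byte ['1', '1', '0'] 4 (m / 2 ^ 13) 6 (by constructor <;> decide)
        have hb2 := parse_byte ['1', '0'] 5 (m / 2 ^ 7) 2 (by constructor <;> decide)
        have hb3 := parse_byte ['0'] 6 m 0 (by constructor <;> decide)
        simp only [List.cons_append, List.nil_append, show (4 : Nat) + 1 = 5 from rfl,
          show (5 : Nat) + 1 = 6 from rfl, show (6 : Nat) + 1 = 7 from rfl] at hb1 hb2 hb3
        norm_num at hb1 hb2 hb3
        simp [hb1, hb2, hb3, List.mapM_cons]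
      · rw [if_neg (by rw [plen_le_iff m 18 (by omega)]; omega), if_neg h3,
          if_pos ((plen_le_iff m 22 (by omega)).mpr (by omega))]
        rw [pad_eq_bits 22 m (by omega) (by omega),
          show (22 : Nat) = 4 + 18 from rfl, bits_split,
          show bits 18 m = bits 5 (m / 2 ^ 13) ++ bits 13 m from bits_split 5 13 m,
          show bits 13 m = bits 6 (m / 2 ^ 7) ++ bits 7 m from bits_split 6 7 m]
        have d9 : ((bits 4 (m / 2 ^ 18) ++
              (bits 5 (m / 2 ^ 13) ++ (bits 6 (m / 2 ^ 7) ++ bits 7 m)))).drop 9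
            = bits 6 (m / 2 ^ 7) ++ bits 7 m := by
          rw [← List.append_assoc]
          exact List.drop_left' (by simp [bits_length])
        have d15 : ((bits 4 (m / 2 ^ 18) ++
              (bits 5 (m / 2 ^ 13) ++ (bits 6 (m / 2 ^ 7) ++ bits 7 m)))).drop 15
            = bits 7 m := by
          rw [← List.append_assoc, ← List.append_assoc]
          exact List.drop_left' (by simp [bits_length])
        rw [d9, d15, List.take_left' (bits_length 4 (m / 2 ^ 18)),
          List.drop_left' (bits_length 4 (m / 2 ^ 18)),
          List.take_left' (bits_length 5 (m / 2 ^ 13)),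
          List.take_left' (bits_length 6 (m / 2 ^ 7))]
        have hb1 := parse_byte ['1', '1', '1', '0'] 3 (m / 2 ^ 18) 14 (by constructor <;> decide)
        have hb2 := parse_byte ['1', '1', '0'] 4 (m / 2 ^ 13) 6 (by constructor <;> decide)
        have hb3 := parse_byte ['1', '0'] 5 (m / 2 ^ 7) 2 (by constructor <;> decide)
        have hb4 := parse_byte ['0'] 6 m 0 (by constructor <;> decide)
        simp only [List.cons_append, List.nil_append, show (3 : Nat) + 1 = 4 from rfl,
          show (4 : Nat) + 1 = 5 from rfl, show (5 : Nat) + 1 = 6 from rfl,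
          show (6 : Nat) + 1 = 7 from rfl] at hb1 hb2 hb3 hb4
        norm_num at hb1 hb2 hb3 hb4
        simp [hb1, hb2, hb3, hb4, List.mapM_cons]
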